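-- pv_equiv track=rewrite | github.com/enjoydarts/sifto | worker/app/services/minimax_service.py | _merge_fact_lists
-- ===== SOURCE A (Python) =====
-- def _merge_fact_lists(fact_lists: list[list[str]], max_items: int = 24) -> list[str]:
--     # De-dup while preserving coverage across chunks by interleaving.
--     normalized_seen: set[str] = set()
--     merged: list[str] = []
--     max_len = max((len(xs) for xs in fact_lists), default=0)
--     for i in range(max_len):
--         for facts in fact_lists:
--             if i >= len(facts):
--                 continue
--             fact = facts[i].strip()
--             if not fact:
--                 continue
--             key = " ".join(fact.lower().split())
--             if key in normalized_seen:
--                 continue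
--             normalized_seen.add(key)
--             merged.append(fact)
--             if len(merged) >= max_items:
--                 return merged
--     return merged
-- ===== SOURCE B (Python) =====
-- def _merge_fact_lists(fact_lists: list[list[str]], max_items: int = 24) -> list[str]:
--     # Phase 1: transpose the row-major input into per-column buckets, then
--     # flatten the buckets into the column-major (interleaved) stream.
--     columns: list[list[str]] = []
--     for facts in fact_lists:
--         for i, fact in enumerate(facts):
--             if i < len(columns):
--                 columns[i].append(fact)
--             else:
--                 columns.append([fact])
--     stream = [fact for column in columns for fact in column]
--
--     # Phase 2: one flat pass over the prebuilt stream: strip, drop empties,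
--     # de-dup on the normalized key, stop at the cap.
--     merged: list[str] = []
--     seen: set[str] = set()
--     for raw in stream:
--         fact = raw.strip()
--         if not fact:
--             continue
--         key = " ".join(fact.lower().split())
--         if key in seen:
--             continue
--         seen.add(key)
--         merged.append(fact)
--         if len(merged) >= max_items:
--             break
--     return merged
-- ===== Notes on version B (the rewrite author's own statement) =====
-- stated objective: alternative
-- what changed: A's fused index-driven double loop (for i in range(max_len): for facts in fact_lists: skip/strip/dedup/cap) is split into a linear row-major bucket transpose that prebuilds the interleaved column-major stream, followed by one flat dedup-and-cap pass over that stream.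
import Mathlib
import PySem

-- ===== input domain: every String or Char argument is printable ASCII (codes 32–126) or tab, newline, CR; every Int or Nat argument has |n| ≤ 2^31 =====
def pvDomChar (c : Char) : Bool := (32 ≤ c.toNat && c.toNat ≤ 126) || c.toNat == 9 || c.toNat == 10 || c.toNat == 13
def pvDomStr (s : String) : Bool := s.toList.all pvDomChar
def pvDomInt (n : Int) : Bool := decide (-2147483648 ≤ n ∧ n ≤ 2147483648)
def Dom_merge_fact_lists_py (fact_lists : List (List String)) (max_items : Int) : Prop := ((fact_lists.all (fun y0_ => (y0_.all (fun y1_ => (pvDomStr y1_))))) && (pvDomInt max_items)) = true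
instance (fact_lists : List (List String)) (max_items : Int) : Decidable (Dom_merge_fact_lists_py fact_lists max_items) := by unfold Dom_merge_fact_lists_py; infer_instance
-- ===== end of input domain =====

-- B re-decomposes A's fused index-driven double loop into two phases: a linear bucket transpose
-- that prebuilds the interleaved (column-major) stream, then one flat dedup-and-cap pass (objective: alternative).

-- ===== PORT A =====
-- key = " ".join(fact.lower().split())  (identical expression in both Python sources)
def pvKey (fact : String) : String :=
  PySem.Str.join " " (PySem.Str.split₀ (PySem.Str.lower fact))

-- max_len = max((len(xs) for xs in fact_lists), default=0): max over the lengths, default 0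
def pvMaxLen (ls : List (List String)) : Nat :=
  (ls.map List.length).foldr max 0

-- the body of A's inner 'for facts in fact_lists' loop; the Bool records whether the
-- early 'return merged' fired
def pvAInner (i : Nat) (rows : List (List String)) (seen : PySem.Set String)
    (merged : List String) (max_items : Int) : PySem.Set String × List String × Bool :=
  match rows with
  | [] => (seen, merged, false)
  | facts :: rs =>
    match facts[i]? with
    | none => pvAInner i rs seen merged max_items           -- if i >= len(facts): continue
    | some raw =>
      let fact := PySem.Str.strip raw
      if fact = "" then pvAInner i rs seen merged max_items -- if not fact: continue
      else
        let key := pvKey fact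
        if PySem.Set.contains seen key then pvAInner i rs seen merged max_items
        else
          let merged' := merged ++ [fact]
          if max_items ≤ (merged'.length : Int) then (PySem.Set.add seen key, merged', true)
          else pvAInner i rs (PySem.Set.add seen key) merged' max_items

-- A's outer 'for i in range(max_len)' loop
def pvAOuter (idxs : List Nat) (rows : List (List String)) (seen : PySem.Set String)
    (merged : List String) (max_items : Int) : List String :=
  match idxs with
  | [] => merged
  | i :: rest =>
    match pvAInner i rows seen merged max_items with
    | (_, merged', true) => merged'
    | (seen', merged', false) => pvAOuter rest rows seen' merged' max_items

def merge_fact_lists_py (fact_lists : List (List String)) (max_items : Int) : List String :=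
  pvAOuter (List.range (pvMaxLen fact_lists)) fact_lists PySem.Set.empty [] max_items

-- ===== PORT B =====
-- B's inner 'for i, fact in enumerate(facts)' loop: walk facts and columns in lockstep;
-- while i < len(columns) the fact goes into bucket i (columns[i].append), after that each
-- remaining fact opens a new bucket (columns.append([fact]))
def pvAddRow : List String → List (List String) → List (List String)
  | [], cols => cols
  | f :: fs, [] => [f] :: pvAddRow fs []
  | f :: fs, c :: cs => (c ++ [f]) :: pvAddRow fs cs

-- B's outer 'for facts in fact_lists' loop of phase 1
def pvColumns (rows : List (List String)) : List (List String) :=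
  rows.foldl (fun cols facts => pvAddRow facts cols) []

-- B's phase 2: one flat dedup-and-cap pass over the prebuilt stream
def pvDedup (stream : List String) (seen : PySem.Set String)
    (merged : List String) (max_items : Int) : List String :=
  match stream with
  | [] => merged
  | raw :: rest =>
    let fact := PySem.Str.strip raw
    if fact = "" then pvDedup rest seen merged max_items
    else
      let key := pvKey fact
      if PySem.Set.contains seen key then pvDedup rest seen merged max_items
      else
        let merged' := merged ++ [fact]
        if max_items ≤ (merged'.length : Int) then merged'
        else pvDedup rest (PySem.Set.add seen key) merged' max_items

-- stream = [fact for column in columns for fact in column]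
def merge_fact_lists_py_alt (fact_lists : List (List String)) (max_items : Int) : List String :=
  pvDedup (pvColumns fact_lists).flatten PySem.Set.empty [] max_items

-- ===== PRECONDITION & SPEC =====
def Spec_merge_fact_lists_py (fact_lists : List (List String)) (max_items : Int) (out : List String) : Prop := out = merge_fact_lists_py_alt fact_lists max_items
instance (fact_lists : List (List String)) (max_items : Int) (out : List String) : Decidable (Spec_merge_fact_lists_py fact_lists max_items out) := by unfold Spec_merge_fact_lists_py; infer_instance

-- ===== CLAIM (what is proved, stated in full; the proofs are below) =====
def Claim_equal_merge_fact_lists_py : Prop := ∀ (fact_lists : List (List String)) (max_items : Int), Dom_merge_fact_lists_py fact_lists max_items → Spec_merge_fact_lists_py fact_lists max_items (merge_fact_lists_py fact_lists max_items)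

-- ===== LEMMAS AND PROOFS =====

-- proof-side: process the raw facts of one column, returning A's inner-loop state triple
def pvStep (c : List String) (seen : PySem.Set String)
    (merged : List String) (max_items : Int) : PySem.Set String × List String × Bool :=
  match c with
  | [] => (seen, merged, false)
  | raw :: rest =>
    let fact := PySem.Str.strip raw
    if fact = "" then pvStep rest seen merged max_items
    else
      let key := pvKey fact
      if PySem.Set.contains seen key then pvStep rest seen merged max_items
      else
        let merged' := merged ++ [fact]
        if max_items ≤ (merged'.length : Int) then (PySem.Set.add seen key, merged', true)
        else pvStep rest (PySem.Set.add seen key) merged' max_items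

-- A's inner loop over the rows at column i is pvStep on the column's present entries
theorem pvAInner_eq_pvStep (i : Nat) (rows : List (List String)) (seen : PySem.Set String)
    (merged : List String) (mi : Int) :
    pvAInner i rows seen merged mi
      = pvStep (rows.filterMap (fun xs => xs[i]?)) seen merged mi := by
  induction rows generalizing seen merged with
  | nil => simp [pvAInner, pvStep]
  | cons facts rs ih =>
    rw [pvAInner, List.filterMap_cons]
    cases h : facts[i]? with
    | none => simpa using ih seen merged
    | some raw =>
      rw [pvStep]
      split_ifs <;> simp_all [ih]

-- B's flat pass consumes one column at a time exactly like pvStep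
theorem pvDedup_append (c r : List String) (seen : PySem.Set String)
    (merged : List String) (mi : Int) :
    pvDedup (c ++ r) seen merged mi
      = (match pvStep c seen merged mi with
         | (_, merged', true) => merged'
         | (seen', merged', false) => pvDedup r seen' merged' mi) := by
  induction c generalizing seen merged with
  | nil => simp [pvStep]
  | cons raw rest ih =>
    rw [List.cons_append, pvDedup, pvStep]
    simp only [ih]
    split_ifs <;> simp

-- A's nested loops are B's flat pass over the index-built column-major stream
theorem pvAOuter_eq_pvDedup (idxs : List Nat) (rows : List (List String))
    (seen : PySem.Set String) (merged : List String) (mi : Int) :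
    pvAOuter idxs rows seen merged mi
      = pvDedup (idxs.flatMap (fun i => rows.filterMap (fun xs => xs[i]?))) seen merged mi := by
  induction idxs generalizing seen merged with
  | nil => simp [pvAOuter, pvDedup]
  | cons i rest ih =>
    rw [pvAOuter, List.flatMap_cons, pvDedup_append, pvAInner_eq_pvStep]
    cases h : pvStep (rows.filterMap (fun xs => xs[i]?)) seen merged mi with
    | mk seen' p =>
      cases p with
      | mk merged' b => cases b <;> simp [ih]

-- proof-side column calculus: pvZipCat pads two column lists together; pvT is the
-- right-fold transpose pvColumns folds up to
def pvZipCat : List (List String) → List (List String) → List (List String)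
  | [], ds => ds
  | cs, [] => cs
  | c :: cs, d :: ds => (c ++ d) :: pvZipCat cs ds

def pvT (rows : List (List String)) : List (List String) :=
  rows.foldr (fun r acc => pvZipCat (r.map (fun f => [f])) acc) []

theorem pvZipCat_nil_right (cs : List (List String)) : pvZipCat cs [] = cs := by
  cases cs <;> rfl

theorem pvAddRow_eq_zipCat (facts : List String) (cols : List (List String)) :
    pvAddRow facts cols = pvZipCat cols (facts.map (fun f => [f])) := by
  induction facts generalizing cols with
  | nil => simp [pvAddRow, pvZipCat_nil_right]
  | cons f fs ih =>
    cases cols with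
    | nil => simp [pvAddRow, pvZipCat, ih]
    | cons c cs => simp [pvAddRow, pvZipCat, ih]

theorem pvZipCat_assoc (a b c : List (List String)) :
    pvZipCat (pvZipCat a b) c = pvZipCat a (pvZipCat b c) := by
  induction a generalizing b c with
  | nil => rfl
  | cons x xs ih =>
    cases b with
    | nil => rw [pvZipCat_nil_right]; rfl
    | cons y ys =>
      cases c with
      | nil => rw [pvZipCat_nil_right, pvZipCat_nil_right]
      | cons z zs => simp [pvZipCat, ih]

theorem pvFoldl_eq_zipCat (rows : List (List String)) (cols : List (List String)) :
    rows.foldl (fun cols facts => pvAddRow facts cols) cols = pvZipCat cols (pvT rows) := by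
  induction rows generalizing cols with
  | nil => simp [pvT, pvZipCat_nil_right]
  | cons r rs ih =>
    rw [List.foldl_cons, ih, pvAddRow_eq_zipCat, pvZipCat_assoc]
    rfl

theorem pvColumns_eq_pvT (rows : List (List String)) : pvColumns rows = pvT rows := by
  rw [pvColumns, pvFoldl_eq_zipCat]; rfl

theorem pvZipCat_head (a b : List (List String)) :
    ((pvZipCat a b).head?.getD []) = (a.head?.getD []) ++ (b.head?.getD []) := by
  cases a with
  | nil => simp [pvZipCat]
  | cons x xs => cases b with
    | nil => simp [pvZipCat_nil_right]
    | cons y ys => simp [pvZipCat]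

theorem pvZipCat_tail (a b : List (List String)) :
    (pvZipCat a b).tail = pvZipCat a.tail b.tail := by
  cases a with
  | nil => simp [pvZipCat]
  | cons x xs => cases b with
    | nil => simp [pvZipCat_nil_right]
    | cons y ys => simp [pvZipCat]

theorem pvT_head (rows : List (List String)) :
    (pvT rows).head?.getD [] = rows.filterMap (fun xs => xs[0]?) := by
  induction rows with
  | nil => rfl
  | cons r rs ih =>
    show (pvZipCat (r.map (fun f => [f])) (pvT rs)).head?.getD [] = _
    rw [pvZipCat_head, List.filterMap_cons]
    cases r with
    | nil => simpa using ih
    | cons f fs => simp [ih]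

theorem pvT_tail (rows : List (List String)) :
    (pvT rows).tail = pvT (rows.map List.tail) := by
  induction rows with
  | nil => rfl
  | cons r rs ih =>
    show (pvZipCat (r.map (fun f => [f])) (pvT rs)).tail = _
    rw [pvZipCat_tail, ih]
    cases r <;> rfl

theorem pvCol_succ (rows : List (List String)) (i : Nat) :
    rows.filterMap (fun xs => xs[i + 1]?)
      = (rows.map List.tail).filterMap (fun xs => xs[i]?) := by
  induction rows with
  | nil => rfl
  | cons c cs ih =>
    cases c with
    | nil =>
      rw [List.map_cons, List.tail_nil,
        List.filterMap_cons_none (by simp), List.filterMap_cons_none (by simp)]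
      exact ih
    | cons a as =>
      rw [List.map_cons, List.tail_cons]
      cases hv : as[i]? with
      | none =>
        rw [List.filterMap_cons_none (by simp [hv]),
          List.filterMap_cons_none (f := fun xs : List String => xs[i]?) hv]
        exact ih
      | some v =>
        rw [List.filterMap_cons_some (b := v) (by simp [hv]),
          List.filterMap_cons_some (f := fun xs : List String => xs[i]?) hv, ih]

theorem pvMaxLen_tail (rows : List (List String)) :
    pvMaxLen (rows.map List.tail) = pvMaxLen rows - 1 := by
  induction rows with
  | nil => rfl
  | cons r rs ih =>
    simp only [pvMaxLen, List.map_cons, List.foldr_cons] at ih ⊢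
    have : r.tail.length = r.length - 1 := by simp
    omega

theorem pvMaxLen_zero (rows : List (List String)) (h : pvMaxLen rows = 0) :
    pvT rows = [] := by
  induction rows with
  | nil => rfl
  | cons r rs ih =>
    simp only [pvMaxLen, List.map_cons, List.foldr_cons] at h
    have hr : r = [] := by
      cases r with
      | nil => rfl
      | cons a as => simp at h
    have hrs : pvMaxLen rs = 0 := by simp [pvMaxLen]; omega
    show pvZipCat (r.map (fun f => [f])) (pvT rs) = []
    rw [hr, ih hrs]; rfl

theorem pvStream_eq_flatten (rows : List (List String)) :
    (List.range (pvMaxLen rows)).flatMap (fun i => rows.filterMap (fun xs => xs[i]?))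
      = (pvColumns rows).flatten := by
  rw [pvColumns_eq_pvT]
  generalize hn : pvMaxLen rows = n
  induction n generalizing rows with
  | zero => simp [pvMaxLen_zero rows hn]
  | succ n ih =>
    rw [List.range_succ_eq_map, List.flatMap_cons, List.flatMap_map]
    have h0 : rows.filterMap (fun xs => xs[0]?) = (pvT rows).head?.getD [] :=
      (pvT_head rows).symm
    have hcols : (fun i => rows.filterMap (fun xs => xs[i + 1]?))
        = (fun i => (rows.map List.tail).filterMap (fun xs => xs[i]?)) :=
      funext (fun i => pvCol_succ rows i)
    have hn' : pvMaxLen (rows.map List.tail) = n := by rw [pvMaxLen_tail, hn]; omega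
    have hflat : (pvT rows).flatten = (pvT rows).head?.getD [] ++ (pvT rows).tail.flatten := by
      cases h : pvT rows <;> simp
    rw [hflat, pvT_tail]
    simp only [Nat.succ_eq_add_one, hcols, h0]
    rw [ih _ hn']

-- ===== VERDICT (by name: the statement is the Claim_ definition above) =====
theorem merge_fact_lists_py_spec : Claim_equal_merge_fact_lists_py := by
  intro fact_lists max_items _
  show merge_fact_lists_py fact_lists max_items = merge_fact_lists_py_alt fact_lists max_items
  rw [merge_fact_lists_py, merge_fact_lists_py_alt, pvAOuter_eq_pvDedup,
    pvStream_eq_flatten]
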